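-- pv_equiv track=rewrite | github.com/Raphalsk050/OpenGLStudy | ThirdParty/filament/libs/bluevk/bluevk-gen.py | isAncestor
-- ===== SOURCE A (Python) =====
-- def isAncestor(types, name, base):
--     """
--     Returns true if 'base' is an ancestor of 'name'.
--     Particularly useful for checking if a given Vulkan type descends from VkDevice or VkInstance.
--     """
--     if name == base:
--         return True
--     type = types.get(name)
--     if type is None:
--         return False
--     parent = type.get('parent')
--     if not parent:
--         return False
--     return isAncestor(types, parent, base)
-- ===== SOURCE B (Python) =====
-- def isAncestor(types, name, base):
--     """
--     Returns true if 'base' is an ancestor of 'name'.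
--     Precompute a name -> parent index (normalising falsy parents to None),
--     then walk it iteratively with a visited set.
--     """
--     parent_of = {n: (t.get('parent') or None) for n, t in types.items()}
--     seen = set()
--     cur = name
--     while cur not in seen:
--         if cur == base:
--             return True
--         seen.add(cur)
--         cur = parent_of.get(cur)
--         if cur is None:
--             return False
--     return False
-- ===== Notes on version B (the rewrite author's own statement) =====
-- stated objective: alternative
-- what changed: The tail recursion over nested dict lookups is replaced by a one-pass precomputed name->parent index (falsy parents normalised away) followed by an iterative walk with a visited set.
-- crash fix: On inputs whose parent chain cycles without reaching base or a terminal, A raises RecursionError; B's visited set detects the revisit and it returns False. — e.g. on isAncestor([("a", [("parent", "a")])], "a", "b"): A raises RecursionError, B returns false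
import Mathlib
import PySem

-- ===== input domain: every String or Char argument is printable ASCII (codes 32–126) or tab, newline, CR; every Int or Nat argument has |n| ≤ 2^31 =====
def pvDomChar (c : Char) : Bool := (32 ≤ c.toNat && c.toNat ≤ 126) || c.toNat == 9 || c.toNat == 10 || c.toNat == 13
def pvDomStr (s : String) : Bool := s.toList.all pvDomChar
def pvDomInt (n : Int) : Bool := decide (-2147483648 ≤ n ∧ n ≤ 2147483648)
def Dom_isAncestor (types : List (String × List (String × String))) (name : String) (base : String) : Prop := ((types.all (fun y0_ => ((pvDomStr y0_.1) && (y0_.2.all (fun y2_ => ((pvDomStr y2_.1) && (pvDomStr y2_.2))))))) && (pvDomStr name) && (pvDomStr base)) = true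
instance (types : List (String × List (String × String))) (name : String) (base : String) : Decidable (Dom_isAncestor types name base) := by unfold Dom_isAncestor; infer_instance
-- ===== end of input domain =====

-- B replaces A's recursion over nested dict lookups by a precomputed name→parent index
-- plus an iterative walk with a visited set; on cyclic tables A raises RecursionError
-- (excluded by Pre_) while B returns False.

-- ===== PORT A =====
-- dict.get on the association lists (first match, like Python's dict lookup)
def pvGetT (d : List (String × List (String × String))) (k : String) : Option (List (String × String)) :=
  (d.find? (fun kv => kv.1 == k)).map (·.2)

def pvGetS (d : List (String × String)) (k : String) : Option String :=
  (d.find? (fun kv => kv.1 == k)).map (·.2)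

-- A's recursion, with fuel as a pure totality guard (Pre_ guarantees it never runs out)
def goA (types : List (String × List (String × String))) (base : String) : Nat → String → Bool
  | 0, _ => false
  | f + 1, name =>
    if name = base then true
    else
      match pvGetT types name with
      | none => false
      | some t =>
        match pvGetS t "parent" with
        | none => false
        | some p => if p = "" then false else goA types base f p

def isAncestor (types : List (String × List (String × String))) (name : String) (base : String) : Bool :=
  goA types base (types.length + 1) name

-- ===== PORT B =====
-- the dict comprehension: one pass building the name→parent index, '' or missing parent becomes none
def pvParentOf (types : List (String × List (String × String))) : List (String × Option String) :=
  types.map (fun kv =>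
    (kv.1, match kv.2.lookup "parent" with
           | some p => if p = "" then none else some p
           | none => none))

-- the while loop: `seen` is the visited set, fuel is a pure totality guard
def walkB (pmap : List (String × Option String)) (base : String) : Nat → String → List String → Bool
  | 0, _, _ => false
  | f + 1, cur, seen =>
    if seen.contains cur then false
    else if cur = base then true
    else
      match pmap.lookup cur with
      | some (some p) => walkB pmap base f p (cur :: seen)
      | _ => false

def isAncestor_alt (types : List (String × List (String × String))) (name : String) (base : String) : Bool :=
  walkB (pvParentOf types) base (types.length + 2) name []

-- ===== PRECONDITION & SPEC =====
-- one (base-stopped) step of the parent chain: none = the chain stops here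
def pvNext (types : List (String × List (String × String))) (base : String) (k : String) : Option String :=
  if k = base then none
  else
    match pvGetT types k with
    | none => none
    | some t =>
      match pvGetS t "parent" with
      | none => none
      | some p => if p = "" then none else some p

def pvStep (types : List (String × List (String × String))) (base : String) (o : Option String) : Option String :=
  o.bind (pvNext types base)

-- Pre_ excludes exactly the inputs whose parent chain from `name` cycles without reaching
-- `base` or a terminal: there Python A raises RecursionError (returns no value).
def Pre_isAncestor (types : List (String × List (String × String))) (name : String) (base : String) : Prop :=
  (pvStep types base)^[types.length + 1] (some name) = none
instance (types : List (String × List (String × String))) (name : String) (base : String) : Decidable (Pre_isAncestor types name base) := by unfold Pre_isAncestor; infer_instance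

def pvWitness_isAncestor : (List (String × List (String × String))) × String × String :=
  ([("VkDevice", [("parent", "VkInstance")])], "VkDevice", "VkInstance")

-- On inputs whose parent chain cycles without reaching base or a terminal, A raises RecursionError; B's visited set detects the revisit and it returns False.
def Raises_isAncestor (types : List (String × List (String × String))) (name : String) (base : String) : Prop :=
  (pvStep types base)^[types.length + 1] (some name) ≠ none
instance (types : List (String × List (String × String))) (name : String) (base : String) : Decidable (Raises_isAncestor types name base) := by unfold Raises_isAncestor; infer_instance

def pvRaiseWitness_isAncestor : (List (String × List (String × String))) × String × String :=
  ([("a", [("parent", "a")])], "a", "b")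

def pvRaiseWitnessOut_isAncestor : Bool := false

def Spec_isAncestor (types : List (String × List (String × String))) (name : String) (base : String) (out : Bool) : Prop := out = isAncestor_alt types name base
instance (types : List (String × List (String × String))) (name : String) (base : String) (out : Bool) : Decidable (Spec_isAncestor types name base out) := by unfold Spec_isAncestor; infer_instance

-- ===== CLAIM (what is proved, stated in full; the proofs are below) =====
def Claim_equal_isAncestor : Prop := ∀ (types : List (String × List (String × String))) (name : String) (base : String), Dom_isAncestor types name base → Pre_isAncestor types name base → Spec_isAncestor types name base (isAncestor types name base)

def Claim_raises_isAncestor : Prop := (∀ (types : List (String × List (String × String))) (name : String) (base : String), Dom_isAncestor types name base → Raises_isAncestor types name base → ¬ Pre_isAncestor types name base) ∧ (Dom_isAncestor (pvRaiseWitness_isAncestor.1) (pvRaiseWitness_isAncestor.2.1) (pvRaiseWitness_isAncestor.2.2) ∧ Raises_isAncestor (pvRaiseWitness_isAncestor.1) (pvRaiseWitness_isAncestor.2.1) (pvRaiseWitness_isAncestor.2.2) ∧ isAncestor_alt (pvRaiseWitness_isAncestor.1) (pvRaiseWitness_isAncestor.2.1) (pvRaiseWitness_isAncestor.2.2) = 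pvRaiseWitnessOut_isAncestor)

-- ===== LEMMAS AND PROOFS =====

lemma pvGetS_eq_lookup (d : List (String × String)) (k : String) :
    pvGetS d k = d.lookup k := by
  induction d with
  | nil => rfl
  | cons kv tl ih =>
    obtain ⟨k1, v1⟩ := kv
    by_cases h : k1 = k
    · simp [pvGetS, List.lookup, List.find?, h]
    · have h' : (k1 == k) = false := by simpa using h
      have h'' : (k == k1) = false := by simpa using (Ne.symm h)
      simpa [pvGetS, List.lookup, List.find?, h', h''] using ih

-- B's index lookup, expressed through A's primitives
lemma lookup_pvParentOf (types : List (String × List (String × String))) (k : String) :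
    (pvParentOf types).lookup k =
      (pvGetT types k).map (fun t =>
        match pvGetS t "parent" with
        | some p => if p = "" then none else some p
        | none => none) := by
  induction types with
  | nil => rfl
  | cons kv tl ih =>
    obtain ⟨k1, v1⟩ := kv
    by_cases h : k1 = k
    · simp [pvParentOf, pvGetT, List.lookup, List.find?, h, pvGetS_eq_lookup]
    · have h' : (k1 == k) = false := by simpa using h
      have h'' : (k == k1) = false := by simpa using (Ne.symm h)
      simpa [pvParentOf, pvGetT, List.lookup, List.find?, h', h''] using ih

lemma iterate_none (types : List (String × List (String × String))) (base : String) (n : Nat) :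
    (pvStep types base)^[n] none = none :=
  Function.iterate_fixed rfl n

-- a cycle in the base-stopped chain never dies
lemma cycle_no_die (types : List (String × List (String × String))) (base : String)
    (p : String) (k : Nat) (hk : 0 < k)
    (hc : (pvStep types base)^[k] (some p) = some p) :
    ∀ m, (pvStep types base)^[m] (some p) ≠ none := by
  intro m
  induction m using Nat.strong_induction_on with
  | _ m ih =>
    by_cases h : m ≤ k
    · intro hm
      have h1 : (pvStep types base)^[k] (some p) = none := by
        have h2 := Function.iterate_add_apply (pvStep types base) (k - m) m (some p)
        rw [Nat.sub_add_cancel h] at h2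
        rw [h2, hm, iterate_none]
      rw [hc] at h1
      exact Option.some_ne_none p h1
    · intro hm
      have h2 := Function.iterate_add_apply (pvStep types base) (m - k) k (some p)
      rw [hc] at h2
      rw [Nat.sub_add_cancel (by omega)] at h2
      exact ih (m - k) (by omega) (h2 ▸ hm)

lemma mem_keys_of_pvGetT (types : List (String × List (String × String))) (k : String)
    (t : List (String × String)) (h : pvGetT types k = some t) : k ∈ types.map (·.1) := by
  unfold pvGetT at h
  rcases Option.map_eq_some_iff.mp h with ⟨kv, hfind, _⟩
  have hmem := List.mem_of_find?_eq_some hfind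
  have heq : kv.1 = k := by
    have := List.find?_some hfind
    simpa using this
  exact heq ▸ List.mem_map_of_mem hmem

-- main invariant: A's recursion from `cur` equals B's walk given the visited set so far
lemma goA_eq_walkB (types : List (String × List (String × String))) (base : String) :
    ∀ (fA fB : Nat) (cur : String) (seen : List String),
      (pvStep types base)^[fA] (some cur) = none →
      base ∉ seen →
      cur ∉ seen →
      seen.Nodup →
      (∀ x ∈ seen, x ∈ types.map (·.1)) →
      (∀ x ∈ cur :: seen, ∃ k, (pvStep types base)^[k] (some x) = some cur) →
      types.length + 2 ≤ fB + seen.length →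
      goA types base fA cur = walkB (pvParentOf types) base fB cur seen := by
  intro fA
  induction fA with
  | zero =>
    intro fB cur seen hdie _ _ _ _ _ _
    exact absurd hdie (by simp)
  | succ fA ih =>
    intro fB cur seen hdie hbase hcur hnd hkeys hpath hfuel
    have hlen : seen.length ≤ types.length := by
      have : seen.length ≤ (types.map (·.1)).length :=
        (List.subperm_of_subset hnd (fun x hx => hkeys x hx)).length_le
      simpa using this
    obtain ⟨fb, rfl⟩ : ∃ fb, fB = fb + 1 := ⟨fB - 1, by omega⟩
    have hcontains : seen.contains cur = false := by
      simp [List.contains_eq_mem, hcur]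
    have hstep : (pvStep types base)^[fA] (pvNext types base cur) = none := by
      have h := Function.iterate_succ_apply (pvStep types base) fA (some cur)
      rw [h] at hdie
      exact hdie
    by_cases hb : cur = base
    · simp [goA, walkB, hb, hbase]
    · simp only [goA, walkB, hcontains, Bool.false_eq_true, if_false, if_neg hb,
        lookup_pvParentOf]
      unfold pvNext at hstep
      rw [if_neg hb] at hstep
      cases hT : pvGetT types cur with
      | none => simp only [hT] at hstep ⊢; simp [Option.map_none]
      | some t =>
        simp only [hT] at hstep ⊢
        cases hP : pvGetS t "parent" with
        | none => simp [hP]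
        | some p =>
          simp only [hP] at hstep ⊢
          by_cases hpe : p = ""
          · simp [hP, hpe]
          · simp only [if_neg hpe] at hstep ⊢
            simp only [Option.map_some, hP, if_neg hpe]
            -- p is a fresh name: otherwise the base-stopped chain cycles and never dies
            have hnextcur : pvNext types base cur = some p := by
              simp [pvNext, if_neg hb, hT, hP, hpe]
            have hpfresh : p ∉ cur :: seen := by
              intro hp
              rcases hpath p hp with ⟨k, hk⟩
              have hcyc : (pvStep types base)^[k + 1] (some p) = some p := by
                rw [Function.iterate_succ_apply', hk]
                simpa [pvStep] using hnextcur
              exact cycle_no_die types base p (k + 1) (Nat.succ_pos k) hcyc fA hstep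
            have hbase' : base ∉ cur :: seen := by
              simp only [List.mem_cons]
              rintro (h | h)
              · exact hb h.symm
              · exact hbase h
            apply ih fb p (cur :: seen) hstep hbase' hpfresh
            · exact List.nodup_cons.mpr ⟨hcur, hnd⟩
            · intro x hx
              rcases List.mem_cons.mp hx with h | h
              · exact h ▸ mem_keys_of_pvGetT types cur t hT
              · exact hkeys x h
            · intro x hx
              rcases List.mem_cons.mp hx with h | h
              · exact ⟨0, by simp [h]⟩
              · rcases hpath x h with ⟨k, hk⟩
                exact ⟨k + 1, by rw [Function.iterate_succ_apply', hk]; simpa [pvStep] using hnextcur⟩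
            · simp only [List.length_cons]
              omega

-- ===== VERDICT (by name: the statement is the Claim_ definition above) =====
theorem isAncestor_spec : Claim_equal_isAncestor := by
  intro types name base _ hpre
  unfold Spec_isAncestor isAncestor isAncestor_alt
  apply goA_eq_walkB types base (types.length + 1) (types.length + 2) name []
    hpre (by simp) (by simp) List.nodup_nil (by simp)
  · intro x hx
    have hx' : x = name := by simpa using hx
    exact ⟨0, by simp [hx']⟩
  · simp

theorem isAncestor_raises : Claim_raises_isAncestor := by
  unfold Claim_raises_isAncestor
  constructor
  · intro types name base _ hr hp
    exact hr hp
  · exact ⟨by decide, by decide, by decide⟩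

-- self-check that the raise-witness claim is the one proved above (cites isAncestor_raises)
theorem isAncestor_raises_ok : Claim_raises_isAncestor :=
  ⟨isAncestor_raises.1, isAncestor_raises.2⟩
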